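-- pv_equiv track=rewrite | github.com/davidmeer20/rankrocket_react | src/py_utils.py | get_drilldown_all
-- ===== SOURCE A (Python) =====
-- def get_drilldown_all(data):
--     types = {
--         'Heading': ['H1', 'H2'],
--         'Canonical': ['Canonical'],
--         'Meta Description': ['Meta Description']
--     }
--     drilldown = {label: 0 for label in types}
--
--     for page in data:
--         for issue in page.get('issues', []):
--             issue_type = issue.get('type')
--             for label, keys in types.items():
--                 if issue_type in keys:
--                     drilldown[label] += 1
--
--     return drilldown
-- ===== SOURCE B (Python) =====
-- def get_drilldown_all(data):
--     # Phase 1: tally every issue type once.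
--     counts = {}
--     for page in data:
--         for issue in page.get('issues', []):
--             t = issue.get('type')
--             counts[t] = counts.get(t, 0) + 1
--     # Phase 2: reduce the global tally per label.
--     types = {
--         'Heading': ['H1', 'H2'],
--         'Canonical': ['Canonical'],
--         'Meta Description': ['Meta Description']
--     }
--     return {label: sum(counts.get(k, 0) for k in keys) for label, keys in types.items()}
-- ===== Notes on version B (the rewrite author's own statement) =====
-- stated objective: alternative
-- what changed: Instead of testing each issue against every label's key list and incrementing label counters in the inner loop, B first builds one global frequency table of issue types and then computes each label's count as a sum of table lookups in a separate reduce phase.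
import Mathlib
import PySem

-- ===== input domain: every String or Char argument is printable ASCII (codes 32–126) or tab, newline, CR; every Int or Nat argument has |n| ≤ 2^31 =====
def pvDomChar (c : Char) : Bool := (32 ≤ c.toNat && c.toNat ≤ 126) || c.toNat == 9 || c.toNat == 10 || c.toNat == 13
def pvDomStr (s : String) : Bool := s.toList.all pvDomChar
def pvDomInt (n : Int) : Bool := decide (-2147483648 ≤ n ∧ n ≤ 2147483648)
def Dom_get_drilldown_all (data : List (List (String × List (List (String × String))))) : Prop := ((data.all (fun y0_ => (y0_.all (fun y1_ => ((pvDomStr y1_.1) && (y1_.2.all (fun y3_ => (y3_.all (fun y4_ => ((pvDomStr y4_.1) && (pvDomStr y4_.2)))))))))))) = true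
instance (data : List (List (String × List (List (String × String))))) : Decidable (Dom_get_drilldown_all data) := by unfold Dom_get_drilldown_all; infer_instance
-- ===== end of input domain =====

-- B reorganises A's interleaved per-issue label counting into two phases (tally every issue type once, then reduce per label); same results, similar cost.

-- ===== PORT A =====
-- the literal 'types' table of A (B's python re-states the same literal; B's port has its own copy)
def pvTypesA : List (String × List String) :=
  [("Heading", ["H1", "H2"]), ("Canonical", ["Canonical"]), ("Meta Description", ["Meta Description"])]

def get_drilldown_all (data : List (List (String × List (List (String × String))))) : List (String × Int) :=
  let types := pvTypesA
  let drilldown : PySem.Dict String Int :=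
    types.foldl (fun d p => d.insert p.1 0) PySem.Dict.empty
  let drilldown :=
    data.foldl (fun d page =>
      ((PySem.Dict.ofList page).getD "issues" []).foldl (fun d issue =>
        let issue_type := (PySem.Dict.ofList issue).get? "type"
        types.foldl (fun d p =>
          if issue_type.any (fun t => p.2.contains t) then d.modify p.1 0 (· + 1) else d) d) d)
      drilldown
  drilldown.items

-- ===== PORT B =====
def get_drilldown_all_alt (data : List (List (String × List (List (String × String))))) : List (String × Int) :=
  let counts : PySem.Dict (Option String) Int :=
    data.foldl (fun c page =>
      ((PySem.Dict.ofList page).getD "issues" []).foldl (fun c issue =>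
        let t := (PySem.Dict.ofList issue).get? "type"
        c.insert t (c.getD t 0 + 1)) c)
      PySem.Dict.empty
  [("Heading", ["H1", "H2"]), ("Canonical", ["Canonical"]),
    ("Meta Description", ["Meta Description"])].map
    (fun p => (p.1, (p.2.map (fun k => counts.getD (some k) 0)).sum))

-- ===== PRECONDITION & SPEC =====
def Spec_get_drilldown_all (data : List (List (String × List (List (String × String))))) (out : List (String × Int)) : Prop := out = get_drilldown_all_alt data
instance (data : List (List (String × List (List (String × String))))) (out : List (String × Int)) : Decidable (Spec_get_drilldown_all data out) := by unfold Spec_get_drilldown_all; infer_instance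

-- ===== CLAIM (what is proved, stated in full; the proofs are below) =====
def Claim_equal_get_drilldown_all : Prop := ∀ (data : List (List (String × List (List (String × String))))), Dom_get_drilldown_all data → Spec_get_drilldown_all data (get_drilldown_all data)

-- ===== LEMMAS AND PROOFS =====

-- the flattened stream of issue types both programs consume
def pvTs (data : List (List (String × List (List (String × String))))) : List (Option String) :=
  data.flatMap (fun page =>
    ((PySem.Dict.ofList page).getD "issues" []).map (fun issue => (PySem.Dict.ofList issue).get? "type"))

-- A's per-issue update, and the fixed key list of A's drilldown dict
def pvStepA (d : PySem.Dict String Int) (t : Option String) : PySem.Dict String Int :=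
  pvTypesA.foldl (fun d p =>
    if t.any (fun s => p.2.contains s) then d.modify p.1 0 (· + 1) else d) d

def pvL : List String := ["Heading", "Canonical", "Meta Description"]

-- nested foldl over pages/issues = foldl over the flattened type stream
theorem pv_foldl_flat {σ : Type} (g : σ → Option String → σ)
    (data : List (List (String × List (List (String × String))))) (init : σ) :
    data.foldl (fun s page =>
      ((PySem.Dict.ofList page).getD "issues" []).foldl (fun s issue =>
        g s ((PySem.Dict.ofList issue).get? "type")) s) init
    = (pvTs data).foldl g init := by
  induction data generalizing init with
  | nil => rfl
  | cons p rest ih =>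
    simp only [pvTs, List.flatMap_cons, List.foldl_append, List.foldl_map, List.foldl_cons] at *
    rw [ih]

theorem pv_upd_keys (d : PySem.Dict String Int) (k : String) (hk : k ∈ d.keys) (f : Int → Int) :
    (d.modify k 0 f).keys = d.keys := by
  rw [PySem.Dict.keys_modify,
    PySem.Dict.keys_insert_of_contains _ _ ((PySem.Dict.contains_iff_mem_keys d k).2 hk)]

theorem pv_updL (d : PySem.Dict String Int) (hd : d.keys = pvL) (k : String) (hk : k ∈ pvL)
    (f : Int → Int) : (d.modify k 0 f).keys = pvL := by
  rw [pv_upd_keys d k (hd ▸ hk) f, hd]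

theorem pvStepA_keys (t : Option String) (d : PySem.Dict String Int) (hd : d.keys = pvL) :
    (pvStepA d t).keys = pvL := by
  simp only [pvStepA, pvTypesA, List.foldl_cons, List.foldl_nil]
  split_ifs <;> (repeat refine pv_updL _ ?_ _ (by decide) _) <;> exact hd

theorem pv_foldA_keys (ts : List (Option String)) (d : PySem.Dict String Int) (hd : d.keys = pvL) :
    (ts.foldl pvStepA d).keys = pvL := by
  induction ts generalizing d with
  | nil => exact hd
  | cons t rest ih => exact ih _ (pvStepA_keys t d hd)

theorem pvStepA_getD (d : PySem.Dict String Int) (t : Option String) (lab : String)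
    (keys : List String) (h : (lab, keys) ∈ pvTypesA) :
    (pvStepA d t).getD lab 0 = d.getD lab 0 + (if t.any (fun s => keys.contains s) then 1 else 0) := by
  fin_cases h <;>
  · simp only [pvStepA, pvTypesA, List.foldl_cons, List.foldl_nil]
    split_ifs <;> simp_all [PySem.Dict.getD_modify]

theorem pv_foldA_getD (ts : List (Option String)) (d : PySem.Dict String Int)
    (lab : String) (keys : List String) (h : (lab, keys) ∈ pvTypesA) :
    (ts.foldl pvStepA d).getD lab 0
      = d.getD lab 0 + ↑(ts.countP (fun t => t.any (fun s => keys.contains s))) := by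
  induction ts generalizing d with
  | nil => simp
  | cons t rest ih =>
    rw [List.foldl_cons, ih (pvStepA d t), pvStepA_getD d t lab keys h, List.countP_cons]
    split_ifs <;> omega

-- countP of membership-in-keys = sum of per-key counts
theorem pv_countP_pair (ts : List (Option String)) (a b : String) (hab : a ≠ b) :
    (ts.countP (fun t => t.any (fun s => [a, b].contains s)) : Int)
      = ts.count (some a) + ts.count (some b) := by
  induction ts with
  | nil => simp
  | cons t rest ih =>
    rcases t with _ | t
    · simpa [List.countP_cons, List.count_cons] using ih
    · simp only [List.countP_cons, List.count_cons]
      by_cases ha : t = a <;> by_cases hb : t = b <;>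
        simp_all [Option.any] <;> omega

theorem pv_countP_single (ts : List (Option String)) (a : String) :
    (ts.countP (fun t => t.any (fun s => [a].contains s)) : Int) = ts.count (some a) := by
  induction ts with
  | nil => simp
  | cons t rest ih =>
    rcases t with _ | t
    · simpa [List.countP_cons, List.count_cons] using ih
    · simp only [List.countP_cons, List.count_cons]
      by_cases ha : t = a <;> simp_all [Option.any]

-- ===== VERDICT (by name: the statement is the Claim_ definition above) =====
theorem get_drilldown_all_spec : Claim_equal_get_drilldown_all := by
  intro data _
  show get_drilldown_all data = get_drilldown_all_alt data
  simp only [get_drilldown_all, get_drilldown_all_alt]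
  have eA : ∀ init : PySem.Dict String Int,
      data.foldl (fun d page =>
        ((PySem.Dict.ofList page).getD "issues" []).foldl (fun d issue =>
          pvTypesA.foldl (fun d p =>
            if ((PySem.Dict.ofList issue).get? "type").any (fun t => p.2.contains t)
            then d.modify p.1 0 (· + 1) else d) d) d) init
      = (pvTs data).foldl pvStepA init := fun init => pv_foldl_flat pvStepA data init
  have eB : ∀ init : PySem.Dict (Option String) Int,
      data.foldl (fun c page =>
        ((PySem.Dict.ofList page).getD "issues" []).foldl (fun c issue =>
          c.insert ((PySem.Dict.ofList issue).get? "type")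
            (c.getD ((PySem.Dict.ofList issue).get? "type") 0 + 1)) c) init
      = (pvTs data).foldl (fun c t => c.insert t (c.getD t 0 + 1)) init :=
    fun init => pv_foldl_flat (fun c t => c.insert t (c.getD t 0 + 1)) data init
  rw [eA, eB]
  have h0 : ∀ lab : String,
      (pvTypesA.foldl (fun d p => d.insert p.1 0) PySem.Dict.empty).getD lab 0 = (0 : Int) := by
    intro lab
    simp only [pvTypesA, List.foldl_cons, List.foldl_nil, PySem.Dict.getD_insert]
    split_ifs <;> simp [PySem.Dict.getD_empty]
  have hkeys : ((pvTs data).foldl pvStepA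
      (pvTypesA.foldl (fun d p => d.insert p.1 0) PySem.Dict.empty)).keys = pvL :=
    pv_foldA_keys _ _ (by decide)
  rw [PySem.Dict.items_eq_map_keys _ (by rw [hkeys]; decide) 0, hkeys]
  simp only [pvL, List.map_cons, List.map_nil, List.sum_cons, List.sum_nil,
    pv_foldA_getD _ _ _ _ (by decide : ("Heading", ["H1", "H2"]) ∈ pvTypesA),
    pv_foldA_getD _ _ _ _ (by decide : ("Canonical", ["Canonical"]) ∈ pvTypesA),
    pv_foldA_getD _ _ _ _ (by decide : ("Meta Description", ["Meta Description"]) ∈ pvTypesA),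
    PySem.Dict.getD_foldl_insert_add_one, pv_countP_pair _ "H1" "H2" (by decide), pv_countP_single,
    h0, PySem.Dict.getD_empty]
  norm_num
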